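-- pv_equiv track=rewrite | github.com/joominchul/codingTestJoo | Lv.3 불량 사용자.py | checkBan
-- ===== SOURCE A (Python) =====
-- def checkBan(ban_id, user_id):
--     ban_len = len(ban_id)
--     same_id = set()
--     for i in user_id:
--         if len(i) == ban_len:
--             for num in range(ban_len):
--                 if ban_id[num] != '*' and ban_id[num] != i[num]:
--                     break
--             else:
--                 same_id.add(i)
--     return same_id
-- ===== SOURCE B (Python) =====
-- def checkBan(ban_id, user_id):
--     def matches(p, s):
--         # consume pattern and candidate together; unequal lengths fail naturally
--         if not p and not s:
--             return True
--         if not p or not s: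
--             return False
--         return (p[0] == '*' or p[0] == s[0]) and matches(p[1:], s[1:])
--     return {u for u in user_id if matches(ban_id, u)}
-- ===== Notes on version B (the rewrite author's own statement) =====
-- stated objective: simpler
-- what changed: Replaces the explicit length check plus index loop with break/else by a recursive matcher that consumes pattern and candidate together (length mismatch fails structurally), collecting matches in a set comprehension.
import Mathlib
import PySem

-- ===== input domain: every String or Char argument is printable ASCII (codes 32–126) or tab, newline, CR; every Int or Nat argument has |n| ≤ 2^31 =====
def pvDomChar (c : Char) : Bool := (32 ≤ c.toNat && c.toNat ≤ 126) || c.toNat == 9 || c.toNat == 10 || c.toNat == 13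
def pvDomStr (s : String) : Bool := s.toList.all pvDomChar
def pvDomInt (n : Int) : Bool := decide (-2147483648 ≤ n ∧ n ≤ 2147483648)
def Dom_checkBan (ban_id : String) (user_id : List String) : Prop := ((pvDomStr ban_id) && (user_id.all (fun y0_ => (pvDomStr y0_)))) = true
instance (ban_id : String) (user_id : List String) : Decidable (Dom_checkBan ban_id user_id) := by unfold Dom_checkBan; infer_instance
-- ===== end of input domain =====

-- B replaces A's length check + index loop with break/else by a recursive matcher
-- consuming both strings together; same results, a simpler decomposition (no speed claim).

-- ===== PORT A =====
-- inner 'for num in range(ban_len): … break / else: add' loop, over the remaining indices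
def checkBanScan (ban s : List Char) : List Int → Bool
  | [] => true
  | n :: rest =>
    if PySem.List.pyGetD ban n ' ' ≠ '*' ∧ PySem.List.pyGetD ban n ' ' ≠ PySem.List.pyGetD s n ' ' then
      false
    else
      checkBanScan ban s rest

def checkBan (ban_id : String) (user_id : List String) : List String :=
  let ban_len := PySem.Str.len ban_id
  user_id.foldl
    (fun same_id i =>
      if PySem.Str.len i = ban_len then
        if checkBanScan ban_id.toList i.toList (PySem.List.pyRange 0 ban_len 1) then
          PySem.Set.add same_id i
        else same_id
      else same_id)
    PySem.Set.empty

-- ===== PORT B =====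
-- recursive matcher: pattern and candidate are consumed together
def checkBanMatch : List Char → List Char → Bool
  | [], [] => true
  | [], _ :: _ => false
  | _ :: _, [] => false
  | p :: ps, c :: cs => (p == '*' || p == c) && checkBanMatch ps cs

def checkBan_alt (ban_id : String) (user_id : List String) : List String :=
  user_id.foldl
    (fun acc u => if checkBanMatch ban_id.toList u.toList then PySem.Set.add acc u else acc)
    PySem.Set.empty

-- ===== PRECONDITION & SPEC =====
def Spec_checkBan (ban_id : String) (user_id : List String) (out : List String) : Prop := out = checkBan_alt ban_id user_id
instance (ban_id : String) (user_id : List String) (out : List String) : Decidable (Spec_checkBan ban_id user_id out) := by unfold Spec_checkBan; infer_instance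

-- ===== CLAIM (what is proved, stated in full; the proofs are below) =====
def Claim_equal_checkBan : Prop := ∀ (ban_id : String) (user_id : List String), Dom_checkBan ban_id user_id → Spec_checkBan ban_id user_id (checkBan ban_id user_id)

-- ===== LEMMAS AND PROOFS =====

-- positionwise check over the zipped lists, the common characterisation of both loops
def chkZip (ban s : List Char) : Bool :=
  (ban.zip s).all (fun pc => pc.1 == '*' || pc.1 == pc.2)

lemma scan_eq_chkZip (ban s : List Char) (h : s.length = ban.length) :
    ∀ a : Nat, checkBanScan ban s (PySem.List.pyRange a ban.length 1)
      = chkZip (ban.drop a) (s.drop a) := by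
  intro a
  by_cases ha : a < ban.length
  · rw [PySem.List.pyRange_one_cons (by exact_mod_cast ha)]
    have hb : ban.drop a = ban[a] :: ban.drop (a + 1) := List.drop_eq_getElem_cons ha
    have hs : s.drop a = s[a] :: s.drop (a + 1) := List.drop_eq_getElem_cons (by omega)
    have ih := scan_eq_chkZip ban s h (a + 1)
    simp only [checkBanScan]
    have hcast : (a : Int) + 1 = ((a + 1 : Nat) : Int) := by push_cast; ring
    rw [hcast, ih, hb, hs]
    simp only [PySem.List.pyGetD_natCast, List.getD_eq_getElem?_getD,
      List.getElem?_eq_getElem ha, List.getElem?_eq_getElem (show a < s.length by omega),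
      Option.getD_some, chkZip, List.zip_cons_cons, List.all_cons]
    by_cases h1 : ban[a] = '*'
    · simp [h1]
    · by_cases h2 : ban[a] = s[a] <;> simp [h1, h2]
  · rw [PySem.List.pyRange_one_eq_nil (by exact_mod_cast Nat.le_of_not_lt ha)]
    have : ban.drop a = [] := List.drop_eq_nil_of_le (Nat.le_of_not_lt ha)
    simp [checkBanScan, this, chkZip]
termination_by a => ban.length - a
decreasing_by omega

lemma match_eq (ban s : List Char) :
    checkBanMatch ban s
      = if s.length = ban.length then chkZip ban s else false := by
  induction ban generalizing s with
  | nil => cases s <;> simp [checkBanMatch, chkZip]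
  | cons p ps ih =>
    cases s with
    | nil => simp [checkBanMatch]
    | cons c cs =>
      simp only [checkBanMatch, ih, chkZip, List.zip_cons_cons, List.all_cons,
        List.length_cons]
      by_cases hl : cs.length = ps.length
      · simp [hl]
      · simp [hl]

lemma step_eq (ban i : String) (acc : List String) :
    (if PySem.Str.len i = PySem.Str.len ban then
        if checkBanScan ban.toList i.toList (PySem.List.pyRange 0 (PySem.Str.len ban) 1) then
          PySem.Set.add acc i
        else acc
      else acc)
    = (if checkBanMatch ban.toList i.toList then PySem.Set.add acc i else acc) := by
  rw [match_eq]
  by_cases hl : i.toList.length = ban.toList.length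
  · have h0 := scan_eq_chkZip ban.toList i.toList hl 0
    simp only [Nat.cast_zero, List.drop_zero, String.length_toList] at h0
    have hl' : i.length = ban.length := by simpa using hl
    simp [PySem.Str.len_eq, hl', hl, h0]
  · have hl' : ¬ i.length = ban.length := by simpa using hl
    simp [PySem.Str.len_eq, hl', hl]

lemma fold_eq (ban : String) (user_id : List String) (acc : List String) :
    user_id.foldl
      (fun same_id i =>
        if PySem.Str.len i = PySem.Str.len ban then
          if checkBanScan ban.toList i.toList (PySem.List.pyRange 0 (PySem.Str.len ban) 1) then
            PySem.Set.add same_id i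
          else same_id
        else same_id) acc
    = user_id.foldl
        (fun a u => if checkBanMatch ban.toList u.toList then PySem.Set.add a u else a) acc := by
  induction user_id generalizing acc with
  | nil => rfl
  | cons u us ih => simp only [List.foldl_cons, step_eq]

-- ===== VERDICT (by name: the statement is the Claim_ definition above) =====
theorem checkBan_spec : Claim_equal_checkBan := by
  intro ban_id user_id _
  unfold Spec_checkBan checkBan checkBan_alt
  exact fold_eq ban_id user_id PySem.Set.empty
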